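-- pv_equiv track=rewrite | github.com/orestis/pysmell | matchers.py | camelGroups
-- ===== SOURCE A (Python) =====
-- def camelGroups(word):
--     groups = []
--     rest = word
--     while rest:
--         i, limit = 0, len(rest)
--         while i < limit:
--             suspect = rest[1:i+1]
--             if i and not (suspect.islower() and suspect.isalnum()):
--                 break
--             i += 1
--         part, rest = rest[:i], rest[i:]
--         groups.append(part)
--     return groups
-- ===== SOURCE B (Python) =====
-- def camelGroups(word):
--     # single left-to-right scan: per-character tests with a "seen a lowercase letter"
--     # flag replace A's repeated slicing and whole-prefix islower/isalnum re-checks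
--     groups = []
--     n = len(word)
--     i = 0
--     while i < n:
--         j = i + 1
--         seen_lower = False
--         while j < n:
--             c = word[j]
--             if c.islower():
--                 seen_lower = True
--             elif not (c.isdigit() and seen_lower):
--                 break
--             j += 1
--         groups.append(word[i:j])
--         i = j
--     return groups
-- ===== Notes on version B (the rewrite author's own statement) =====
-- stated objective: faster
-- what changed: replaced the rebuild-a-slice-and-recheck-the-whole-prefix inner loop with a single linear scan that tests each character once, carrying a seen-lowercase flag instead of recomputing islower/isalnum over growing slices
import Mathlib
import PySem

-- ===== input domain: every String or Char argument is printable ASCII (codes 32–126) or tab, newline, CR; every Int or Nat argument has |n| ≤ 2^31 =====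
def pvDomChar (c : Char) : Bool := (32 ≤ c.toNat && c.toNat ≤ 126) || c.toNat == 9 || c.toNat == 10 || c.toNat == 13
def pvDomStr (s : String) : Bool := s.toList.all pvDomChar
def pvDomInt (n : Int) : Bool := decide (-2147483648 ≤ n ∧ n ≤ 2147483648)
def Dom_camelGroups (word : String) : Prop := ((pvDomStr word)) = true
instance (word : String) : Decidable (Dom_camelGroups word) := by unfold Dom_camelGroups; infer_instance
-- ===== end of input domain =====

-- B replaces A's grow-a-slice-and-recheck-the-whole-prefix inner loop by a single
-- linear scan that tests each character once, carrying a seen-lowercase flag (objective: faster).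

-- ===== PORT A =====

-- str.islower(): some cased character and every cased character lowercase (exact on ASCII, where cased = letter)
def pyStrIslower (cs : List Char) : Bool :=
  cs.any PySem.Chars.isalpha && cs.all (fun c => !PySem.Chars.isalpha c || PySem.Chars.islower c)

-- inner 'while i < limit' of A: returns the final i
def camelInnerA (rest : List Char) (i limit : Nat) : Nat :=
  if _h : i < limit then
    -- suspect = rest[1:i+1]
    if i ≠ 0 ∧ ¬(pyStrIslower (PySem.List.slice rest (some 1) (some ((i : Int) + 1))) = true
                  ∧ PySem.Chars.strIsalnum (PySem.List.slice rest (some 1) (some ((i : Int) + 1))) = true)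
    then i
    else camelInnerA rest (i + 1) limit
  else i
termination_by limit - i

-- i only grows across A's inner loop (used for termination of the outer loop)
theorem camelInnerA_ge (rest : List Char) (i limit : Nat) : i ≤ camelInnerA rest i limit := by
  unfold camelInnerA
  split
  · split
    · exact le_refl _
    · exact le_trans (Nat.le_succ i) (camelInnerA_ge rest (i + 1) limit)
  · exact le_refl _
termination_by limit - i

-- outer 'while rest' of A
def camelOuterA (rest : List Char) : List String :=
  if h : rest = [] then []
  else
    -- part = rest[:i], new rest = rest[i:]  where i is the result of the inner loop
    String.mk (PySem.List.slice rest none (some ((camelInnerA rest 0 rest.length) : Int)))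
      :: camelOuterA (PySem.List.slice rest (some ((camelInnerA rest 0 rest.length) : Int)) none)
termination_by rest.length
decreasing_by
  have hl : 0 < rest.length := List.length_pos_iff.mpr h
  have h1 : 1 ≤ camelInnerA rest 0 rest.length := by
    unfold camelInnerA
    simp only [hl, dif_pos, ne_eq, not_true_eq_false, false_and, if_neg, not_false_iff]
    exact camelInnerA_ge rest 1 rest.length
  rw [PySem.List.slice_from_natCast]
  simp only [List.length_drop]
  omega

def camelGroups (word : String) : List String := camelOuterA word.toList

-- ===== PORT B =====

-- inner scan of B: consume characters while lowercase (setting the flag) or digit with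
-- the flag set; returns (consumed run, remainder)
def camelInnerB : List Char → Bool → List Char × List Char
  | [], _ => ([], [])
  | c :: cs, seen =>
    if PySem.Chars.islower c then
      let p := camelInnerB cs true
      (c :: p.1, p.2)
    else if PySem.Chars.isdigit c && seen then
      let p := camelInnerB cs seen
      (c :: p.1, p.2)
    else ([], c :: cs)

-- the remainder is no longer than the input (used for termination of B's outer loop)
theorem camelInnerB_snd_length (cs : List Char) (seen : Bool) :
    (camelInnerB cs seen).2.length ≤ cs.length := by
  induction cs generalizing seen with
  | nil => simp [camelInnerB]
  | cons c cs ih =>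
    simp only [camelInnerB]
    split
    · exact le_trans (ih true) (Nat.le_succ _)
    · split
      · exact le_trans (ih seen) (Nat.le_succ _)
      · exact le_refl _

-- outer loop of B: each group is its head character plus the scanned run
def camelOuterB : List Char → List String
  | [] => []
  | c :: cs =>
    String.mk (c :: (camelInnerB cs false).1) :: camelOuterB (camelInnerB cs false).2
termination_by cs => cs.length
decreasing_by
  have := camelInnerB_snd_length cs false
  simp only [List.length_cons]
  omega

def camelGroups_alt (word : String) : List String := camelOuterB word.toList

-- ===== PRECONDITION & SPEC =====
def Spec_camelGroups (word : String) (out : List String) : Prop := out = camelGroups_alt word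
instance (word : String) (out : List String) : Decidable (Spec_camelGroups word out) := by unfold Spec_camelGroups; infer_instance

-- ===== CLAIM (what is proved, stated in full; the proofs are below) =====
def Claim_equal_camelGroups : Prop := ∀ (word : String), Dom_camelGroups word → Spec_camelGroups word (camelGroups word)

-- ===== LEMMAS AND PROOFS =====

theorem pvCharLe (a b : Char) : (a ≤ b) = (a.toNat ≤ b.toNat) := by
  rw [Char.le_def, UInt32.le_iff_toNat_le]; rfl

theorem islower_iff (c : Char) :
    (PySem.Chars.islower c = true) ↔ (97 ≤ c.toNat ∧ c.toNat ≤ 122) := by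
  simp [PySem.Chars.islower, pvCharLe, (show 'a'.toNat = 97 from rfl),
    (show 'z'.toNat = 122 from rfl)]

theorem isupper_iff (c : Char) :
    (PySem.Chars.isupper c = true) ↔ (65 ≤ c.toNat ∧ c.toNat ≤ 90) := by
  simp [PySem.Chars.isupper, pvCharLe, (show 'A'.toNat = 65 from rfl),
    (show 'Z'.toNat = 90 from rfl)]

theorem isdigit_iff (c : Char) :
    (PySem.Chars.isdigit c = true) ↔ (48 ≤ c.toNat ∧ c.toNat ≤ 57) := by
  simp [PySem.Chars.isdigit, pvCharLe, (show '0'.toNat = 48 from rfl),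
    (show '9'.toNat = 57 from rfl)]

-- A's whole-prefix condition, character by character: alnum and not an uppercase letter
-- is exactly lowercase letter or digit
theorem char_cond (c : Char) :
    (PySem.Chars.isalnum c && (!PySem.Chars.isalpha c || PySem.Chars.islower c))
      = (PySem.Chars.islower c || PySem.Chars.isdigit c) := by
  rw [Bool.eq_iff_iff]
  simp only [PySem.Chars.isalnum, PySem.Chars.isalpha, Bool.and_eq_true, Bool.or_eq_true,
    Bool.not_eq_true', Bool.eq_false_iff, ne_eq, islower_iff, isupper_iff, isdigit_iff]
  omega

-- the full condition A checks on a NONEMPTY prefix: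
-- every char lowercase-or-digit, and some char lowercase
theorem cond_iff (p : List Char) (hp : p ≠ []) :
    (pyStrIslower p = true ∧ PySem.Chars.strIsalnum p = true)
      ↔ ((∀ c ∈ p, (PySem.Chars.islower c || PySem.Chars.isdigit c) = true)
          ∧ ∃ c ∈ p, PySem.Chars.islower c = true) := by
  simp only [pyStrIslower, PySem.Chars.strIsalnum, Bool.and_eq_true, List.any_eq_true,
    List.all_eq_true]
  constructor
  · rintro ⟨⟨⟨a, ha, halpha⟩, hlow⟩, ⟨_, halnum⟩⟩
    constructor
    · intro c hc
      rw [← char_cond c]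
      simp [halnum c hc, hlow c hc]
    · refine ⟨a, ha, ?_⟩
      have := hlow a ha
      simp only [Bool.or_eq_true, Bool.not_eq_eq_eq_not, Bool.not_true] at this
      rcases this with h | h
      · rw [halpha] at h; cases h
      · exact h
  · rintro ⟨hall, ⟨a, ha, hla⟩⟩
    refine ⟨⟨⟨a, ha, ?_⟩, ?_⟩, ⟨?_, ?_⟩⟩
    · simp only [PySem.Chars.isalpha, hla, Bool.or_true]
    · intro c hc
      have := hall c hc
      rw [← char_cond c] at this
      simp only [Bool.and_eq_true] at this
      exact this.2
    · simp [hp]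
    · intro c hc
      have := hall c hc
      rw [← char_cond c] at this
      simp only [Bool.and_eq_true] at this
      exact this.1

-- B's scan splits its input
theorem camelInnerB_append (cs : List Char) (seen : Bool) :
    (camelInnerB cs seen).1 ++ (camelInnerB cs seen).2 = cs := by
  induction cs generalizing seen with
  | nil => simp [camelInnerB]
  | cons c cs ih =>
    simp only [camelInnerB]
    split
    · simpa using ih true
    · split
      · simpa using ih seen
      · simp

-- every char B takes is lowercase-or-digit
theorem camelInnerB_fst_all (cs : List Char) (seen : Bool) :
    ∀ c ∈ (camelInnerB cs seen).1, (PySem.Chars.islower c || PySem.Chars.isdigit c) = true := by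
  induction cs generalizing seen with
  | nil => simp [camelInnerB]
  | cons c cs ih =>
    simp only [camelInnerB]
    split
    · intro x hx
      simp only [List.mem_cons] at hx
      rcases hx with rfl | hx
      · simp_all
      · exact ih true x hx
    · split
      · intro x hx
        simp only [List.mem_cons] at hx
        rcases hx with rfl | hx
        · simp_all
        · exact ih seen x hx
      · simp

-- started unseen, every nonempty prefix of the taken run contains a lowercase char
theorem camelInnerB_take_lower (cs : List Char) (seen : Bool) :
    ∀ k, k < (camelInnerB cs seen).1.length →
      seen = true ∨ ∃ c ∈ (camelInnerB cs seen).1.take (k + 1), PySem.Chars.islower c = true := by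
  induction cs generalizing seen with
  | nil => simp [camelInnerB]
  | cons c cs ih =>
    simp only [camelInnerB]
    split
    · intro k _
      right
      exact ⟨c, by simp, by assumption⟩
    · split
      · intro k hk
        rcases k with _ | k
        · rename_i hd
          simp only [Bool.and_eq_true] at hd
          left; exact hd.2
        · simp only [List.length_cons] at hk
          have := ih seen k (by omega)
          rcases this with h | ⟨x, hx, hlx⟩
          · left; exact h
          · right
            exact ⟨x, by simp only [List.take_succ_cons, List.mem_cons]; right; exact hx, hlx⟩
      · simp

-- the char just after the taken run (if any) fails B's character test
theorem camelInnerB_snd_head (cs : List Char) (seen : Bool) (d : Char) (rs : List Char)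
    (h : (camelInnerB cs seen).2 = d :: rs) :
    ¬ (PySem.Chars.islower d = true ∨
       (PySem.Chars.isdigit d = true ∧
        (seen = true ∨ ∃ c ∈ (camelInnerB cs seen).1, PySem.Chars.islower c = true))) := by
  induction cs generalizing seen with
  | nil => simp [camelInnerB] at h
  | cons c cs ih =>
    by_cases hl : PySem.Chars.islower c = true
    · have hfst : (camelInnerB (c :: cs) seen).1 = c :: (camelInnerB cs true).1 := by
        simp [camelInnerB, hl]
      have hsnd : (camelInnerB (c :: cs) seen).2 = (camelInnerB cs true).2 := by
        simp [camelInnerB, hl]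
      rw [hsnd] at h
      have := ih true h
      rw [hfst]
      intro hcon
      apply this
      rcases hcon with h1 | ⟨h1, _⟩
      · left; exact h1
      · right; exact ⟨h1, Or.inl rfl⟩
    · by_cases hd : (PySem.Chars.isdigit c && seen) = true
      · have hfst : (camelInnerB (c :: cs) seen).1 = c :: (camelInnerB cs seen).1 := by
          simp [camelInnerB, hl, hd]
        have hsnd : (camelInnerB (c :: cs) seen).2 = (camelInnerB cs seen).2 := by
          simp [camelInnerB, hl, hd]
        rw [hsnd] at h
        have := ih seen h
        rw [hfst]
        intro hcon
        apply this
        rcases hcon with h1 | ⟨h1, h2⟩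
        · left; exact h1
        · right
          refine ⟨h1, ?_⟩
          rcases h2 with h2 | ⟨x, hx, hlx⟩
          · left; exact h2
          · rcases List.mem_cons.mp hx with rfl | hx
            · left; exact (by simp only [Bool.and_eq_true] at hd; exact hd.2)
            · right; exact ⟨x, hx, hlx⟩
      · have hfst : (camelInnerB (c :: cs) seen).1 = [] := by
          simp [camelInnerB, hl, hd]
        have hsnd : (camelInnerB (c :: cs) seen).2 = c :: cs := by
          simp [camelInnerB, hl, hd]
        rw [hsnd] at h
        injection h with h1 h2
        subst h1; subst h2
        rw [hfst]
        intro hcon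
        rcases hcon with h1 | ⟨h1, h2⟩
        · exact hl h1
        · rcases h2 with h2 | ⟨x, hx, _⟩
          · exact hd (by simp [h1, h2])
          · simp at hx

-- taking one past a left factor of an append
theorem take_len_succ (g : List Char) (d : Char) (rs : List Char) :
    (g ++ d :: rs).take (g.length + 1) = g ++ [d] := by
  induction g with
  | nil => simp
  | cons x xs ih => simp [ih]

-- the slice A tests, rest[1:i+1] on rest = c :: cs, is cs.take i
theorem sliceA_eq_take (c : Char) (cs : List Char) (j : Nat) :
    PySem.List.slice (c :: cs) (some 1) (some ((j : Int) + 1)) = cs.take j := by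
  have hcast : ((j : Int) + 1) = (((j + 1 : Nat) : Int)) := by push_cast; ring
  rw [hcast, show ((1 : Int)) = ((1 : Nat) : Int) from rfl, PySem.List.slice_natCast]
  simp

-- A's inner loop on rest = c :: cs, at any loop state i the invariant admits, finishes at
-- 1 + (length of B's taken run on cs)
theorem innerA_eq_innerB (c : Char) (cs : List Char) (i : Nat)
    (hi : i ≤ (camelInnerB cs false).1.length + 1)
    (hseen : ∀ (_ : 1 ≤ i), i ≤ (camelInnerB cs false).1.length →
      ∃ x ∈ (camelInnerB cs false).1.take i, PySem.Chars.islower x = true) :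
    camelInnerA (c :: cs) i (c :: cs).length = 1 + (camelInnerB cs false).1.length := by
  have hsplit : (camelInnerB cs false).1 ++ (camelInnerB cs false).2 = cs :=
    camelInnerB_append cs false
  have hlen : cs.length = (camelInnerB cs false).1.length + (camelInnerB cs false).2.length := by
    have h2 := List.length_append (as := (camelInnerB cs false).1) (bs := (camelInnerB cs false).2)
    rw [hsplit] at h2
    omega
  rcases Nat.lt_or_ge i ((camelInnerB cs false).1.length + 1) with hlt | hge
  · -- i ≤ the run length: the prefix condition holds, the loop continues
    have hil : i ≤ (camelInnerB cs false).1.length := by omega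
    rw [camelInnerA]
    have hib : i < (c :: cs).length := by simp [hlen]; omega
    rw [dif_pos hib]
    rw [sliceA_eq_take c cs i]
    have hnot : ¬ (i ≠ 0 ∧
        ¬(pyStrIslower (cs.take i) = true ∧ PySem.Chars.strIsalnum (cs.take i) = true)) := by
      rcases Nat.eq_zero_or_pos i with h0 | hpos
      · simp [h0]
      · have htk : cs.take i = (camelInnerB cs false).1.take i := by
          conv_lhs => rw [← hsplit]
          rw [List.take_append_of_le_length hil]
        have hne : cs.take i ≠ [] := by
          rw [htk]
          intro hemp
          have : ((camelInnerB cs false).1.take i).length = 0 := by rw [hemp]; rfl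
          rw [List.length_take] at this
          omega
        rw [not_and_not_right, cond_iff _ hne]
        intro _
        constructor
        · intro y hy
          rw [htk] at hy
          exact camelInnerB_fst_all cs false y (List.mem_of_mem_take hy)
        · rw [htk]
          exact hseen hpos hil
    rw [if_neg hnot]
    apply innerA_eq_innerB c cs (i + 1) (by omega)
    intro _ hsucc
    have := camelInnerB_take_lower cs false i (by omega)
    rcases this with h | h
    · cases h
    · exact h
  · -- i = run length + 1: the loop stops here
    have hieq : i = (camelInnerB cs false).1.length + 1 := by omega
    subst hieq
    rw [camelInnerA]
    rcases hr' : (camelInnerB cs false).2 with _ | ⟨d, rs⟩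
    · have : ¬ ((camelInnerB cs false).1.length + 1 < (c :: cs).length) := by
        simp [hlen, hr']
      rw [dif_neg this]
      omega
    · have hib : (camelInnerB cs false).1.length + 1 < (c :: cs).length := by
        simp [hlen, hr']
      rw [dif_pos hib]
      rw [sliceA_eq_take c cs ((camelInnerB cs false).1.length + 1)]
      have htk : cs.take ((camelInnerB cs false).1.length + 1)
          = (camelInnerB cs false).1 ++ [d] := by
        have h2 := take_len_succ (camelInnerB cs false).1 d rs
        have h3 : (camelInnerB cs false).1 ++ d :: rs = cs := by rw [← hr']; exact hsplit
        rwa [h3] at h2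
      have hhead := camelInnerB_snd_head cs false d rs hr'
      have hfail : ¬(pyStrIslower (cs.take ((camelInnerB cs false).1.length + 1)) = true ∧
          PySem.Chars.strIsalnum (cs.take ((camelInnerB cs false).1.length + 1)) = true) := by
        rw [htk, cond_iff _ (by simp)]
        rintro ⟨hall, ⟨x, hx, hlx⟩⟩
        have hd : (PySem.Chars.islower d || PySem.Chars.isdigit d) = true :=
          hall d (by simp)
        have hnld : ¬ PySem.Chars.islower d = true := fun hc => hhead (Or.inl hc)
        have hdd : PySem.Chars.isdigit d = true := by
          rcases Bool.or_eq_true_iff.mp hd with h | h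
          · exact absurd h hnld
          · exact h
        simp only [List.mem_append, List.mem_singleton] at hx
        rcases hx with hx | rfl
        · exact hhead (Or.inr ⟨hdd, Or.inr ⟨x, hx, hlx⟩⟩)
        · exact hnld hlx
      rw [if_pos ⟨by omega, hfail⟩]
      omega
termination_by (camelInnerB cs false).1.length + 2 - i

-- the outer loops agree
theorem outerA_eq_outerB (rest : List Char) : camelOuterA rest = camelOuterB rest := by
  match rest with
  | [] => rw [camelOuterA, camelOuterB]; simp
  | c :: cs =>
    have hsplit : (camelInnerB cs false).1 ++ (camelInnerB cs false).2 = cs :=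
      camelInnerB_append cs false
    have hinner : camelInnerA (c :: cs) 0 (c :: cs).length
        = 1 + (camelInnerB cs false).1.length :=
      innerA_eq_innerB c cs 0 (by omega) (by omega)
    rw [camelOuterA, camelOuterB]
    rw [dif_neg (by simp : ¬ (c :: cs) = [])]
    rw [hinner]
    have hpart : PySem.List.slice (c :: cs) none
        (some ((1 + (camelInnerB cs false).1.length : Nat) : Int))
        = c :: (camelInnerB cs false).1 := by
      rw [PySem.List.slice_to_natCast]
      rw [show (1 + (camelInnerB cs false).1.length) = (camelInnerB cs false).1.length + 1
        from by omega]
      simp only [List.take_succ_cons]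
      have h2 := List.take_left (l₁ := (camelInnerB cs false).1) (l₂ := (camelInnerB cs false).2)
      rw [hsplit] at h2
      rw [h2]
    have hrest : PySem.List.slice (c :: cs)
        (some ((1 + (camelInnerB cs false).1.length : Nat) : Int)) none
        = (camelInnerB cs false).2 := by
      rw [PySem.List.slice_from_natCast]
      rw [show (1 + (camelInnerB cs false).1.length) = (camelInnerB cs false).1.length + 1
        from by omega]
      simp only [List.drop_succ_cons]
      have h2 := List.drop_left (l₁ := (camelInnerB cs false).1) (l₂ := (camelInnerB cs false).2)
      rw [hsplit] at h2
      rw [h2]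
    rw [hpart, hrest, outerA_eq_outerB (camelInnerB cs false).2]
termination_by rest.length
decreasing_by
  have h1 : (camelInnerB cs false).2.length ≤ cs.length := camelInnerB_snd_length cs false
  simp only [List.length_cons]
  omega

-- ===== VERDICT (by name: the statement is the Claim_ definition above) =====
theorem camelGroups_spec : Claim_equal_camelGroups := by
  intro word _
  unfold Spec_camelGroups camelGroups camelGroups_alt
  exact outerA_eq_outerB word.toList
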